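-- pv_equiv track=rewrite | github.com/josongsong/semantica-codegraph | src/contexts/code_foundation/infrastructure/ir/external_analyzers/pyright_lsp.py | _extract_type_from_markdown
-- ===== SOURCE A (Python) =====
-- def _extract_type_from_markdown(markdown: str) -> tuple[str | None, str | None]:
--     """Extract type and docs from markdown hover content"""
--     lines = markdown.strip().split("\n")
--
--     type_info = None
--     docs = None
--
--     in_code_block = False
--     code_lines = []
--     doc_lines = []
--
--     for line in lines:
--         # Code block markers
--         if line.strip().startswith("```"):
--             if in_code_block:
--                 # End of code block
--                 in_code_block = False
--                 if code_lines:
--                     type_info = "\n".join(code_lines).strip()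
--                 code_lines = []
--             else:
--                 # Start of code block
--                 in_code_block = True
--             continue
--
--         if in_code_block:
--             code_lines.append(line)
--         else:
--             # Documentation
--             if line.strip():
--                 doc_lines.append(line.strip())
--
--     if doc_lines:
--         docs = " ".join(doc_lines)
--
--     # If no code block found, treat entire content as type (for plaintext responses)
--     if not type_info and markdown.strip():
--         type_info = markdown.strip()
--
--     return type_info, docs
-- ===== SOURCE B (Python) =====
-- def _split_block(rest):
--     """Collect lines until the next fence; return (body, remainder after the
--     closing fence) or (body, None) if the block is never closed."""
--     body = []
--     for j, l in enumerate(rest):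
--         if l.strip().startswith("```"):
--             return body, rest[j + 1:]
--         body.append(l)
--     return body, None
--
--
-- def _extract_type_from_markdown(markdown: str) -> tuple:
--     """Extract type and docs from markdown hover content"""
--     stripped = markdown.strip()
--     type_info = None
--     doc_parts = []
--     rest = stripped.split("\n")
--     while rest:
--         line, rest = rest[0], rest[1:]
--         if line.strip().startswith("```"):
--             body, after = _split_block(rest)
--             if after is None:
--                 # trailing unclosed code block: discarded
--                 rest = []
--             else:
--                 if body:
--                     type_info = "\n".join(body).strip()
--                 rest = after
--         elif line.strip():
--             doc_parts.append(line.strip())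
--     docs = " ".join(doc_parts) if doc_parts else None
--     if not type_info and stripped:
--         type_info = stripped
--     return type_info, docs
-- ===== Notes on version B (the rewrite author's own statement) =====
-- stated objective: alternative
-- what changed: A's single pass with an in_code_block boolean toggle and per-line state is replaced by a chunk-consuming loop: at each fence line a helper scans ahead to the matching closing fence and returns the block body and the remainder in one step, so no in-code flag or code_lines accumulator is carried between iterations.
import Mathlib
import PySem

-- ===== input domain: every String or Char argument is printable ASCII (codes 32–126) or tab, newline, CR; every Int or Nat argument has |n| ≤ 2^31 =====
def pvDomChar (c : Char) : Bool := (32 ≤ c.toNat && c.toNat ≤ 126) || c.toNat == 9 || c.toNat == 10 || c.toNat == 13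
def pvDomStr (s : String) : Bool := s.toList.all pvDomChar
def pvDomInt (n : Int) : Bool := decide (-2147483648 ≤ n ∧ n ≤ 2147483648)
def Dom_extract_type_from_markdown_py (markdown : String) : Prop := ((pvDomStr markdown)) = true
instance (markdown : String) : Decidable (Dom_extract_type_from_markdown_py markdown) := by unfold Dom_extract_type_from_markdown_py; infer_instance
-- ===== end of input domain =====

-- B replaces A's per-line in_code_block boolean state machine by a chunk-consuming loop that,
-- at each fence, scans ahead to the closing fence in one helper call (objective: alternative).


-- ===== PORT A =====
-- line.strip().startswith("```")  (shared by both ports: the same expression occurs in Source A and Source B)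
def pvFence (line : String) : Bool := PySem.Str.startswith (PySem.Str.strip line) "```"

-- A's loop body; state = (type_info, in_code_block, code_lines, doc_lines)
def pvStepA (st : Option String × Bool × List String × List String) (line : String) :
    Option String × Bool × List String × List String :=
  let (ti, ic, cl, dl) := st
  if pvFence line then
    if ic then
      ((if cl ≠ [] then some (PySem.Str.strip (PySem.Str.join "\n" cl)) else ti), false, [], dl)
    else (ti, true, cl, dl)
  else if ic then (ti, ic, cl ++ [line], dl)
  else if PySem.Str.strip line ≠ "" then (ti, ic, cl, dl ++ [PySem.Str.strip line])
  else (ti, ic, cl, dl)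

def extract_type_from_markdown_py (markdown : String) : Option String × Option String :=
  let s := PySem.Str.strip markdown
  -- s.split("\n"): split? is none only for separator "", so the getD default is never taken
  let lines := (PySem.Str.split? s "\n").getD [""]
  let r := lines.foldl pvStepA (none, false, [], [])
  let ti := r.1
  let dl := r.2.2.2
  let docs := if dl ≠ [] then some (PySem.Str.join " " dl) else none
  -- `if not type_info and markdown.strip():` — falsy type_info is None or ""
  let ti := if (ti = none ∨ ti = some "") ∧ s ≠ "" then some s else ti
  (ti, docs)

-- ===== PORT B =====
-- Source B's _split_block: body lines up to the next fence, plus the remainder after that fence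
-- (none = the block is never closed)
def pvSplitBlock : List String → List String × Option (List String)
  | [] => ([], none)
  | l :: rest =>
    if pvFence l then ([], some rest)
    else
      let (b, a) := pvSplitBlock rest
      (l :: b, a)

-- termination measure for pvLoopB (cited by its decreasing_by)
theorem pvSplitBlock_after_lt (rest b a : List String) (h : pvSplitBlock rest = (b, some a)) :
    a.length < rest.length := by
  induction rest generalizing b a with
  | nil => simp [pvSplitBlock] at h
  | cons l r ih =>
    by_cases hf : pvFence l
    · simp [pvSplitBlock, hf] at h
      simp [← h.2]
    · simp [pvSplitBlock, hf] at h
      have := ih (pvSplitBlock r).1 a (by rw [← h.2])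
      simp; omega

-- Source B's while loop over the remaining lines; state = (type_info, doc_parts)
def pvLoopB : List String → Option String → List String → Option String × List String
  | [], ti, dp => (ti, dp)
  | line :: rest, ti, dp =>
    if pvFence line then
      match h : pvSplitBlock rest with
      | (_, none) => (ti, dp)
      | (body, some after) =>
        pvLoopB after (if body ≠ [] then some (PySem.Str.strip (PySem.Str.join "\n" body)) else ti) dp
    else
      pvLoopB rest ti (if PySem.Str.strip line ≠ "" then dp ++ [PySem.Str.strip line] else dp)
  termination_by rest => rest.length
  decreasing_by
  · exact Nat.lt_succ_of_lt (pvSplitBlock_after_lt _ _ _ h)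
  · simp

def extract_type_from_markdown_py_alt (markdown : String) : Option String × Option String :=
  let s := PySem.Str.strip markdown
  let (ti, dp) := pvLoopB ((PySem.Str.split? s "\n").getD [""]) none []
  let docs := if dp ≠ [] then some (PySem.Str.join " " dp) else none
  (if (ti = none ∨ ti = some "") ∧ s ≠ "" then some s else ti, docs)

-- ===== PRECONDITION & SPEC =====
def Spec_extract_type_from_markdown_py (markdown : String) (out : Option String × Option String) : Prop := out = extract_type_from_markdown_py_alt markdown
instance (markdown : String) (out : Option String × Option String) : Decidable (Spec_extract_type_from_markdown_py markdown out) := by unfold Spec_extract_type_from_markdown_py; infer_instance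

-- ===== CLAIM (what is proved, stated in full; the proofs are below) =====
def Claim_equal_extract_type_from_markdown_py : Prop := ∀ (markdown : String), Dom_extract_type_from_markdown_py markdown → Spec_extract_type_from_markdown_py markdown (extract_type_from_markdown_py markdown)

-- ===== LEMMAS AND PROOFS =====

-- While inside an unclosed code block, A's fold only accumulates code lines:
-- type_info and doc_lines are untouched.
theorem pvFold_code_none (rest : List String) : ∀ (cl dl : List String) (ti : Option String)
    (b : List String), pvSplitBlock rest = (b, none) →
    (rest.foldl pvStepA (ti, true, cl, dl)).1 = ti ∧
    (rest.foldl pvStepA (ti, true, cl, dl)).2.2.2 = dl := by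
  induction rest with
  | nil => intro cl dl ti b _; simp
  | cons l r ih =>
    intro cl dl ti b h
    cases hf : pvFence l with
    | true => rw [pvSplitBlock, if_pos hf] at h; simp at h
    | false =>
      rw [pvSplitBlock, if_neg (by simp [hf])] at h
      have hstep : pvStepA (ti, true, cl, dl) l = (ti, true, cl ++ [l], dl) := by
        simp [pvStepA, hf]
      simp only [List.foldl_cons, hstep]
      exact ih (cl ++ [l]) dl ti (pvSplitBlock r).1
        (by rcases hs : pvSplitBlock r with ⟨b', a'⟩; rw [hs] at h
            simp at h ⊢; exact h.2 ▸ rfl)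

-- Inside a closed code block, A's fold accumulates exactly pvSplitBlock's body,
-- flushes it at the closing fence, and continues on the remainder.
theorem pvFold_code_some (rest : List String) : ∀ (cl dl : List String) (ti : Option String)
    (body after : List String), pvSplitBlock rest = (body, some after) →
    rest.foldl pvStepA (ti, true, cl, dl) =
      after.foldl pvStepA
        ((if cl ++ body ≠ [] then some (PySem.Str.strip (PySem.Str.join "\n" (cl ++ body))) else ti),
         false, [], dl) := by
  induction rest with
  | nil => intro cl dl ti body after h; simp [pvSplitBlock] at h
  | cons l r ih =>
    intro cl dl ti body after h
    cases hf : pvFence l with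
    | true =>
      rw [pvSplitBlock, if_pos hf] at h
      obtain ⟨hb, ha⟩ := Prod.mk.injEq .. ▸ h
      cases Option.some.injEq .. ▸ ha
      have hstep : pvStepA (ti, true, cl, dl) l =
          ((if cl ≠ [] then some (PySem.Str.strip (PySem.Str.join "\n" cl)) else ti), false, [], dl) := by
        simp [pvStepA, hf]
      subst hb
      simp_all [List.foldl_cons]
    | false =>
      rw [pvSplitBlock, if_neg (by simp [hf])] at h
      rcases hs : pvSplitBlock r with ⟨b', a'⟩
      rw [hs] at h
      simp only at h
      obtain ⟨hb, ha⟩ := Prod.mk.injEq .. ▸ h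
      have hstep : pvStepA (ti, true, cl, dl) l = (ti, true, cl ++ [l], dl) := by
        simp [pvStepA, hf]
      simp only [List.foldl_cons, hstep]
      have := ih (cl ++ [l]) dl ti b' after (by rw [hs, ha])
      rw [this]
      subst hb
      have hab : cl ++ l :: b' = cl ++ [l] ++ b' := by simp
      rw [hab]

-- Outside a code block, A's fold computes exactly B's loop (in the surviving components).
theorem pvFold_eq_loop (rest : List String) (ti : Option String) (dp : List String) :
    (rest.foldl pvStepA (ti, false, [], dp)).1 = (pvLoopB rest ti dp).1 ∧
    (rest.foldl pvStepA (ti, false, [], dp)).2.2.2 = (pvLoopB rest ti dp).2 := by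
  induction rest, ti, dp using pvLoopB.induct with
  | case1 ti dp => simp [pvLoopB]
  | case2 line rest ti dp hf x h =>
    have hstep : pvStepA (ti, false, [], dp) line = (ti, true, [], dp) := by
      simp [pvStepA, hf]
    have hc := pvFold_code_none rest [] dp ti x h
    rw [pvLoopB]
    simp only [hf, if_pos, List.foldl_cons, hstep]
    split
    · exact hc
    · next body after heq => rw [h] at heq; simp at heq
  | case3 line rest ti dp hf body after h ih =>
    have hstep : pvStepA (ti, false, [], dp) line = (ti, true, [], dp) := by
      simp [pvStepA, hf]
    have hc := pvFold_code_some rest [] dp ti body after h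
    rw [pvLoopB]
    simp only [hf, if_pos, List.foldl_cons, hstep]
    split
    · next x heq => rw [h] at heq; simp at heq
    · next body' after' heq =>
      rw [h] at heq
      simp only [Prod.mk.injEq, Option.some.injEq] at heq
      obtain ⟨hb, ha⟩ := heq
      subst hb; subst ha
      rw [hc]
      simpa using ih
  | case4 line rest ti dp hf ih =>
    have hstep : pvStepA (ti, false, [], dp) line =
        (ti, false, [], if PySem.Str.strip line ≠ "" then dp ++ [PySem.Str.strip line] else dp) := by
      by_cases hs : PySem.Str.strip line = ""
      · simp [pvStepA, hf, hs]
      · simp [pvStepA, hf, hs]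
    rw [pvLoopB]
    simp only [List.foldl_cons, hstep, hf, Bool.false_eq_true, if_false]
    exact ih

-- ===== VERDICT (by name: the statement is the Claim_ definition above) =====
theorem extract_type_from_markdown_py_spec : Claim_equal_extract_type_from_markdown_py := by
  intro markdown _
  unfold Spec_extract_type_from_markdown_py extract_type_from_markdown_py extract_type_from_markdown_py_alt
  have h := pvFold_eq_loop ((PySem.Str.split? (PySem.Str.strip markdown) "\n").getD [""]) none []
  simp only []
  rw [h.1, h.2]
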